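-- pv_equiv track=rewrite | github.com/Sandu953/UBB-Informatica | administrator_de_bloc/f3.py | cautare1
-- ===== SOURCE A (Python) =====
-- def cautare1(d:dict,s:int):
--     """
--     Tipărește toate apartamentele care au cheltuieli mai mari decât o sumă dată
--
--     d-dictionar
--     s-int
--
--     return lista
--     """
--     l=[]
--     for i in range(12):
--         c=0
--         for a in d:
--             if d[a][i]!=-1:
--                 c=c+d[a][i]
--         if c>=s:
--             l.append("ap."+str(i+1))
--     return l
-- ===== SOURCE B (Python) =====
-- def cautare1(d: dict, s: int):
--     # One apartment-major pass aggregates every (month, value) cell into a hash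
--     # map of month totals; a separate pass over range(12) then filters with
--     # dict.get and emits the qualifying month labels in order.
--     totals = {}
--     for row in d.values():
--         for i in range(12):
--             v = row[i]
--             if v != -1:
--                 totals[i] = totals.get(i, 0) + v
--     return ["ap." + str(i + 1) for i in range(12) if totals.get(i, 0) >= s]
-- ===== Notes on version B (the rewrite author's own statement) =====
-- stated objective: alternative
-- what changed: Instead of A's twelve month-major rescans of the dict with a per-month scalar accumulator, B flattens the data into one stream of (month, value) entries via enumerate and aggregates it into a hash map of month totals, then a separate pass over range(12) filters with dict.get and emits the labels.
import Mathlib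
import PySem

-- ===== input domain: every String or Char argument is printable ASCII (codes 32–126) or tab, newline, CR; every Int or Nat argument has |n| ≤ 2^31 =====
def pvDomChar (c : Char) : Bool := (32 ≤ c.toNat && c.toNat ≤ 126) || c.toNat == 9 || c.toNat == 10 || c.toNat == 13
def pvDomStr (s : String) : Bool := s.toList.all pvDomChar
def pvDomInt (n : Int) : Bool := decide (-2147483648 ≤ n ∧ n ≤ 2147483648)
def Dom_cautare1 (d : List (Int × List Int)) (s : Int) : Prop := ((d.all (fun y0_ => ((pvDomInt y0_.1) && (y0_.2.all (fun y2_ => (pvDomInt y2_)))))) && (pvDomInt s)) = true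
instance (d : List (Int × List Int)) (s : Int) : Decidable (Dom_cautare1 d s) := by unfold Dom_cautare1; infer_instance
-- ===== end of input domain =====

-- B flattens the table into a stream of (month, value) entries aggregated into a hash map of
-- month totals, then a separate pass over range(12) filters and emits labels (alternative).

-- ===== PORT A =====
-- A: for each month i in range(12), sum d[a][i] over all keys a (skipping -1), emit label if sum >= s.
def cautare1 (d : List (Int × List Int)) (s : Int) : List String :=
  let e := PySem.Dict.ofList d
  (PySem.List.pyRange 0 12 1).foldl (fun l i =>
    let c := e.keys.foldl (fun c a =>
      let v := PySem.List.pyGetD (e.getD a []) i 0   -- d[a][i]; in range under Pre_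
      if v ≠ -1 then c + v else c) 0
    if s ≤ c then l ++ ["ap." ++ PySem.Int.toStr (i + 1)] else l) []

-- ===== PORT B =====
-- B: apartment-major aggregation of (month, value) cells into a month-totals dict, then a filter/map emit pass.
def cautare1_alt (d : List (Int × List Int)) (s : Int) : List String :=
  let e := PySem.Dict.ofList d
  let totals := e.values.foldl (fun t row =>
      (PySem.List.pyRange 0 12 1).foldl (fun t i =>
        let v := PySem.List.pyGetD row i 0   -- row[i]; in range under Pre_
        if v ≠ -1 then t.insert i (t.getD i 0 + v) else t) t)
    (PySem.Dict.empty : PySem.Dict Int Int)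
  ((PySem.List.pyRange 0 12 1).filter (fun i => s ≤ totals.getD i 0)).map
    (fun i => "ap." ++ PySem.Int.toStr (i + 1))

-- ===== PRECONDITION & SPEC =====
-- A raises IndexError when some apartment's expense list (as seen by the dict) has fewer than 12 entries.
def Pre_cautare1 (d : List (Int × List Int)) (s : Int) : Prop :=
  ∀ p ∈ (PySem.Dict.ofList d).items, 12 ≤ p.2.length
instance (d : List (Int × List Int)) (s : Int) : Decidable (Pre_cautare1 d s) := by unfold Pre_cautare1; infer_instance
def pvWitness_cautare1 : (List (Int × List Int)) × Int :=
  ([(1, [2, 3, -1, 0, 4, 5, 1, 1, 0, 2, 7, 6])], 3)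

def Spec_cautare1 (d : List (Int × List Int)) (s : Int) (out : List String) : Prop := out = cautare1_alt d s
instance (d : List (Int × List Int)) (s : Int) (out : List String) : Decidable (Spec_cautare1 d s out) := by unfold Spec_cautare1; infer_instance

-- ===== CLAIM (what is proved, stated in full; the proofs are below) =====
def Claim_equal_cautare1 : Prop := ∀ (d : List (Int × List Int)) (s : Int), Dom_cautare1 d s → Pre_cautare1 d s → Spec_cautare1 d s (cautare1 d s)

-- ===== LEMMAS AND PROOFS =====

-- Invariant of B's aggregation over one row: the range(a,b) update fold shifts the dict's
-- total at key k by exactly that row's month-k contribution (when a ≤ k < b), else not at all.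
theorem inner_row (row : List Int) (t : PySem.Dict Int Int) (k a b : Int) :
    ((PySem.List.pyRange a b 1).foldl (fun t i =>
        let v := PySem.List.pyGetD row i 0
        if v ≠ -1 then t.insert i (t.getD i 0 + v) else t) t).getD k 0
    = t.getD k 0 + (if (a ≤ k ∧ k < b) ∧ PySem.List.pyGetD row k 0 ≠ -1
        then PySem.List.pyGetD row k 0 else 0) := by
  obtain ⟨n, hn⟩ : ∃ n, (b - a).toNat = n := ⟨_, rfl⟩
  induction n generalizing a t with
  | zero =>
    rw [PySem.List.pyRange_one_eq_nil (by omega : b ≤ a)]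
    have : ¬ ((a ≤ k ∧ k < b) ∧ PySem.List.pyGetD row k 0 ≠ -1) := by
      rintro ⟨⟨h1, h2⟩, _⟩; omega
    simp [this]
  | succ n ih =>
    rw [PySem.List.pyRange_one_cons (by omega : a < b)]
    simp only [List.foldl_cons]
    rw [ih _ _ (by omega)]
    by_cases hak : a = k
    · subst hak
      by_cases hv : PySem.List.pyGetD row a 0 = -1
      · simp [hv]
      · have h2 : ((a ≤ a ∧ a < b) ∧ PySem.List.pyGetD row a 0 ≠ -1) := ⟨⟨le_refl a, by omega⟩, hv⟩
        simp [hv, h2]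
    · have hiff : ((a + 1 ≤ k ∧ k < b) ∧ PySem.List.pyGetD row k 0 ≠ -1)
          ↔ ((a ≤ k ∧ k < b) ∧ PySem.List.pyGetD row k 0 ≠ -1) := by
        constructor <;> rintro ⟨⟨h1, h2⟩, h3⟩ <;> exact ⟨⟨by omega, h2⟩, h3⟩
      rw [if_congr hiff rfl rfl]
      have hka : ¬ k = a := fun h => hak h.symm
      by_cases hv : PySem.List.pyGetD row a 0 = -1
      · simp [hv]
      · simp [hv, PySem.Dict.getD_insert, hka]

-- A's month-k sum over the dict equals B's totals-dict entry at k.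
theorem month_total (d : List (Int × List Int)) (k : Int) (h0 : 0 ≤ k) (h12 : k < 12) :
    (PySem.Dict.ofList d).keys.foldl (fun c a =>
        let v := PySem.List.pyGetD ((PySem.Dict.ofList d).getD a []) k 0
        if v ≠ -1 then c + v else c) 0
    = ((PySem.Dict.ofList d).values.foldl (fun t row =>
        (PySem.List.pyRange 0 12 1).foldl (fun t i =>
          let v := PySem.List.pyGetD row i 0
          if v ≠ -1 then t.insert i (t.getD i 0 + v) else t) t)
        (PySem.Dict.empty : PySem.Dict Int Int)).getD k 0 := by
  -- left side: fold over keys = fold over items with direct row access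
  have hleft : (PySem.Dict.ofList d).keys.foldl (fun c a =>
        let v := PySem.List.pyGetD ((PySem.Dict.ofList d).getD a []) k 0
        if v ≠ -1 then c + v else c) 0
      = (PySem.Dict.ofList d).items.foldl (fun c p =>
          c + (if PySem.List.pyGetD p.2 k 0 ≠ -1 then PySem.List.pyGetD p.2 k 0 else 0)) 0 := by
    simp only [PySem.Dict.keys, List.foldl_map]
    apply PySem.List.foldl_congr_mem
    intro c p hp
    have hmem : (p.1, p.2) ∈ (PySem.Dict.ofList d).items := by simpa using hp
    rw [PySem.Dict.getD_of_mem_items _ hmem (PySem.Dict.nodup_keys_ofList d) []]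
    split_ifs <;> omega
  rw [hleft]
  -- right side: peel the rows one by one with inner_row
  have hgen : ∀ (ps : List (Int × List Int)) (t : PySem.Dict Int Int),
      ((ps.map (·.2)).foldl (fun t row =>
        (PySem.List.pyRange 0 12 1).foldl (fun t i =>
          let v := PySem.List.pyGetD row i 0
          if v ≠ -1 then t.insert i (t.getD i 0 + v) else t) t) t).getD k 0
      = ps.foldl (fun c p =>
          c + (if PySem.List.pyGetD p.2 k 0 ≠ -1 then PySem.List.pyGetD p.2 k 0 else 0)) (t.getD k 0) := by
    intro ps
    induction ps with
    | nil => intro t; rfl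
    | cons p ps ih =>
      intro t
      simp only [List.map_cons, List.foldl_cons]
      rw [ih, inner_row p.2 t k 0 12]
      have : ((0 ≤ k ∧ k < 12) ∧ PySem.List.pyGetD p.2 k 0 ≠ -1)
          ↔ PySem.List.pyGetD p.2 k 0 ≠ -1 := by
        constructor
        · rintro ⟨_, h⟩; exact h
        · intro h; exact ⟨⟨h0, h12⟩, h⟩
      rw [if_congr this rfl rfl]
  have := hgen (PySem.Dict.ofList d).items PySem.Dict.empty
  simp only [PySem.Dict.values] at *
  rw [this]
  simp [PySem.List.foldl_add]

-- ===== VERDICT (by name: the statement is the Claim_ definition above) =====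
theorem cautare1_spec : Claim_equal_cautare1 := by
  intro d s _ _
  unfold Spec_cautare1 cautare1 cautare1_alt
  simp only []
  rw [PySem.List.foldl_congr_mem (PySem.List.pyRange 0 12 1) _
    (fun acc i =>
      if (fun i => decide (s ≤ ((PySem.Dict.ofList d).values.foldl (fun t row =>
          (PySem.List.pyRange 0 12 1).foldl (fun t i =>
            let v := PySem.List.pyGetD row i 0
            if v ≠ -1 then t.insert i (t.getD i 0 + v) else t) t)
          (PySem.Dict.empty : PySem.Dict Int Int)).getD i 0)) i = true
      then acc ++ ["ap." ++ PySem.Int.toStr (i + 1)] else acc) []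
    (by
      intro acc i hi
      obtain ⟨h0, h12⟩ := PySem.List.mem_pyRange_one.mp hi
      rw [month_total d i h0 h12]
      simp)]
  rw [PySem.List.foldl_append_if]
  simp
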